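-- pv_equiv track=rewrite | github.com/haris-hk/Data-Structure-and-Algorithms-Vol-2 | skeleton_graph.py | find_number_of_layovers
-- ===== SOURCE A (Python) =====
-- def DFS_all_routes(graph, origin, destination, route, all_routes):
--     # Append the current city to the route
--     city = origin
--     route = route + [city]
--
--     # If the current city is the destination
--     if city == destination:
--         # Add the complete route to the list of all routes
--         all_routes.append(route)
--     else:
--         # For each neighbor of the current city
--         for neighbor in graph[city]:
--             # If the neighbor has not been visited
--             if neighbor[0] not in route:
--                 # Recursively call the function with the neighbor as the new origin
--                 DFS_all_routes(graph, neighbor[0], destination, route, all_routes)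
--
--     # Return the list of all routes
--     return all_routes
--
-- def find_number_of_layovers(graph: dict, origin: str, destination: str):
--     # Initialize empty lists for the route and all routes
--     dlst = []
--     flst = []
--     # If either the origin or destination is not in the graph, return None
--     if destination not in graph or origin not in graph:
--         return None
--     # Call the DFS_all_routes function to find all routes from the origin to the destination
--     lst = DFS_all_routes(graph, origin, destination, dlst, flst)
--     # Print the list of all routes for debugging
--     print (lst)
--     # Initialize an empty list for the number of layovers
--     num_of_layovers = []
--     # For each route in the list of all routes
--     for route in lst:
--         # If the route only contains two cities, append 0 to the list of layovers
--         if len(route) == 2: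
--             num_of_layovers.append(0)
--         # If the route only contains one city, return an empty list
--         elif len(route) == 1:
--             return []
--         # Otherwise, append the number of layovers (length of the route minus 2 to make sure the origin and destination do not count as layovers) to the list of layovers
--         else:
--             num_of_layovers.append(len(route)-2)
--     # Return the list of layovers sorted in ascending order
--     return sorted(num_of_layovers)
-- ===== SOURCE B (Python) =====
-- def find_number_of_layovers(graph: dict, origin: str, destination: str):
--     # Iterative DFS with an explicit stack instead of recursion.
--     if origin not in graph or destination not in graph:
--         return None
--     if origin == destination:
--         # the only simple route is [origin]; A maps that case to []
--         return []
--     routes = []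
--     stack = [(origin, [origin])]
--     while stack:
--         city, route = stack.pop()
--         if city == destination:
--             routes.append(route)
--         else:
--             # push in reversed order so pop order matches left-to-right DFS
--             for neighbor in reversed(graph[city]):
--                 if neighbor[0] not in route:
--                     stack.append((neighbor[0], route + [neighbor[0]]))
--     print(routes)
--     return sorted(len(route) - 2 for route in routes)
-- ===== Notes on version B (the rewrite author's own statement) =====
-- stated objective: alternative
-- what changed: Recursive DFS building all routes plus a post-loop classifying route lengths is replaced by an iterative explicit-stack DFS (neighbors pushed in reverse to keep DFS order) with an upfront origin==destination guard and a direct sorted map of len(route)-2.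
-- outside the precondition, e.g. on find_number_of_layovers({'a': [('b', '1')], 'b': [], 'c': [('x', '1')]}, 'a', 'b'): A returns [0], B returns [0]
import Mathlib
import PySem

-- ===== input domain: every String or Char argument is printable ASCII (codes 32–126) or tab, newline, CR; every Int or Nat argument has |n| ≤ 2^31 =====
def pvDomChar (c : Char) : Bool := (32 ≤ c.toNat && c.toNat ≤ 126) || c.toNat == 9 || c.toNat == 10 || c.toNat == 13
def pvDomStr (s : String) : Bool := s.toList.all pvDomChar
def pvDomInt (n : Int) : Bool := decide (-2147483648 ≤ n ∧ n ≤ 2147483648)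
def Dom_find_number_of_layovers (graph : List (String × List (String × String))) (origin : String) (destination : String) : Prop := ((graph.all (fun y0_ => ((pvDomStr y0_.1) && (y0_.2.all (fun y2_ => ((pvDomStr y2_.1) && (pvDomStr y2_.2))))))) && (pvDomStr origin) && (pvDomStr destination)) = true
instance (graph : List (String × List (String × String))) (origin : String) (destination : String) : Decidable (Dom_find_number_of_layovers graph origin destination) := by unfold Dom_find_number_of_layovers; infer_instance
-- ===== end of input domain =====

-- B replaces A's recursive DFS + post-loop over route lengths by an explicit-stack
-- iterative DFS with a direct sorted map of layover counts (objective: alternative).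
-- A's print(lst) is a side effect on stdout not modelled here; return values only.

-- ===== PORT A =====
-- dict accessors (graph is a Python dict: first-match association-list lookup)
def pvKeys (graph : List (String × List (String × String))) : List String :=
  graph.map (·.1)

def pvAdj (graph : List (String × List (String × String))) (c : String) : List (String × String) :=
  ((graph.find? (fun p => p.1 == c)).map (·.2)).getD []

-- fuel bound for the recursion/loop guards below (never exhausted on inputs in Pre_:
-- every route is duplicate-free over {origin} ∪ neighbour names)
def pvTotalAdj (graph : List (String × List (String × String))) : Nat :=
  graph.foldl (fun s p => s + p.2.length) 0

-- literal transliteration of DFS_all_routes; the fuel is a pure termination guard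
-- (one unit per recursion level), the for-loop over graph[city] is the foldl
def dfsA (graph : List (String × List (String × String))) (dest : String) :
    Nat → String → List String → List (List String) → List (List String)
  | fuel, c, route, acc =>
    if c = dest then acc ++ [route ++ [c]]
    else match fuel with
    | 0 => acc
    | Nat.succ f =>
        (pvAdj graph c).foldl
          (fun a nb => if nb.1 ∈ route ++ [c] then a
                       else dfsA graph dest f nb.1 (route ++ [c]) a) acc

-- the post-loop of find_number_of_layovers (early 'return []' on a length-1 route)
def procA : List (List String) → List Int → Option (List Int)
  | [], acc => some (PySem.List.sorted acc (fun x => x) false)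
  | r :: tl, acc =>
    if r.length = 2 then procA tl (acc ++ [(0 : Int)])
    else if r.length = 1 then some []
    else procA tl (acc ++ [(r.length : Int) - 2])

def find_number_of_layovers (graph : List (String × List (String × String))) (origin : String) (destination : String) : Option (List Int) :=
  if destination ∉ pvKeys graph ∨ origin ∉ pvKeys graph then none
  else procA (dfsA graph destination (pvTotalAdj graph + 2) origin [] []) []

-- ===== PORT B =====
-- the while-loop over the explicit stack (head of the list = top of the stack;
-- pushing reversed(graph[city]) one by one = consing the kept neighbours in order;
-- the fuel — one unit per iteration — and the length check are pure termination guards)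
def runB (graph : List (String × List (String × String))) (dest : String) :
    Nat → List (String × List String) → List (List String) → List (List String)
  | 0, _, routes => routes
  | Nat.succ _, [], routes => routes
  | Nat.succ f, (c, r) :: rest, routes =>
    if c = dest then runB graph dest f rest (routes ++ [r])
    else if r.length ≤ pvTotalAdj graph + 2 then
      runB graph dest f
        ((pvAdj graph c).reverse.foldl
          (fun st nb => if nb.1 ∈ r then st else (nb.1, r ++ [nb.1]) :: st) rest)
        routes
    else runB graph dest f rest routes

def find_number_of_layovers_alt (graph : List (String × List (String × String))) (origin : String) (destination : String) : Option (List Int) :=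
  if origin ∉ pvKeys graph ∨ destination ∉ pvKeys graph then none
  else if origin = destination then some []
  else some (PySem.List.sorted
    ((runB graph destination ((pvTotalAdj graph + 2) ^ (pvTotalAdj graph + 2))
        [(origin, [origin])] []).map (fun r => (r.length : Int) - 2))
    (fun x => x) false)

-- ===== PRECONDITION & SPEC =====
-- Pre_ excludes inputs on which the DFS can reach a city that is neither the
-- destination nor a key of the graph: there Python A raises KeyError (and Python B
-- raises the same KeyError).  Inputs returning None (a missing endpoint) or with
-- origin = destination never look a neighbour up and are admitted; otherwise the
-- condition is stated conservatively over ALL adjacency entries (checkable without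
-- running the search), so it also excludes some inputs with an unreachable dangling
-- neighbour, on which both programs return the same value (see the cite in claim.json).
def Pre_find_number_of_layovers (graph : List (String × List (String × String))) (origin : String) (destination : String) : Prop :=
  destination ∉ pvKeys graph ∨ origin ∉ pvKeys graph ∨ origin = destination ∨
    (∀ p ∈ graph, ∀ nb ∈ p.2, nb.1 = destination ∨ nb.1 ∈ pvKeys graph)

instance (graph : List (String × List (String × String))) (origin : String) (destination : String) : Decidable (Pre_find_number_of_layovers graph origin destination) := by unfold Pre_find_number_of_layovers; infer_instance

def pvWitness_find_number_of_layovers : (List (String × List (String × String))) × String × String :=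
  ([("a", [("b", "1"), ("c", "2")]), ("b", [("c", "3")]), ("c", [])], "a", "c")

def Spec_find_number_of_layovers (graph : List (String × List (String × String))) (origin : String) (destination : String) (out : Option (List Int)) : Prop := out = find_number_of_layovers_alt graph origin destination
instance (graph : List (String × List (String × String))) (origin : String) (destination : String) (out : Option (List Int)) : Decidable (Spec_find_number_of_layovers graph origin destination out) := by unfold Spec_find_number_of_layovers; infer_instance

-- ===== CLAIM (what is proved, stated in full; the proofs are below) =====
def Claim_equal_find_number_of_layovers : Prop := ∀ (graph : List (String × List (String × String))) (origin : String) (destination : String), Dom_find_number_of_layovers graph origin destination → Pre_find_number_of_layovers graph origin destination → Spec_find_number_of_layovers graph origin destination (find_number_of_layovers graph origin destination)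

-- ===== LEMMAS AND PROOFS =====

theorem pvFoldlAdd (tl : List (String × List (String × String))) :
    ∀ n : Nat, tl.foldl (fun s p => s + p.2.length) n
      = n + tl.foldl (fun s p => s + p.2.length) 0 := by
  induction tl with
  | nil => intro n; simp
  | cons hd t ih =>
    intro n
    simp only [List.foldl_cons]
    rw [ih (n + hd.2.length), ih (0 + hd.2.length)]
    omega

theorem pvTotalAdj_cons (hd : String × List (String × String))
    (tl : List (String × List (String × String))) :
    pvTotalAdj (hd :: tl) = hd.2.length + pvTotalAdj tl := by
  unfold pvTotalAdj
  simp only [List.foldl_cons]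
  rw [pvFoldlAdd]
  omega

theorem pvAdj_length_le (graph : List (String × List (String × String))) (c : String) :
    (pvAdj graph c).length ≤ pvTotalAdj graph := by
  induction graph with
  | nil => simp [pvAdj, pvTotalAdj]
  | cons hd tl ih =>
    rw [pvTotalAdj_cons]
    unfold pvAdj
    rw [List.find?_cons]
    by_cases h : (hd.1 == c) = true
    · simp only [h]
      simp
    · simp only [h]
      unfold pvAdj at ih
      omega

-- ----- reference versions of both loops, by well-founded recursion on the
-- ----- remaining depth / a stack weight (used only inside the proofs)
mutual
def dfsW (graph : List (String × List (String × String))) (dest : String)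
    (c : String) (route : List String) (acc : List (List String)) : List (List String) :=
  if c = dest then acc ++ [route ++ [c]]
  else if h : route.length ≤ pvTotalAdj graph + 1 then
    dfsWList graph dest (pvAdj graph c) (route ++ [c]) acc
  else acc
termination_by (pvTotalAdj graph + 2 - route.length, 0)
decreasing_by
  apply Prod.Lex.left
  simp at h ⊢
  omega

def dfsWList (graph : List (String × List (String × String))) (dest : String)
    (adj : List (String × String)) (route' : List String) (acc : List (List String)) : List (List String) :=
  match adj with
  | [] => acc
  | (n, _) :: tl =>
      dfsWList graph dest tl route'
        (if n ∈ route' then acc else dfsW graph dest n route' acc)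
termination_by (pvTotalAdj graph + 2 - route'.length, adj.length + 1)
decreasing_by
  · apply Prod.Lex.right
    simp
  · apply Prod.Lex.right
    simp
end

def pvWeight (T : Nat) (f : String × List String) : Nat := (T + 2) ^ (T + 3 - f.2.length)
def pvMeasure (T : Nat) (stack : List (String × List String)) : Nat :=
  (stack.map (pvWeight T)).sum

theorem pvMeasure_cons (T : Nat) (f : String × List String) (rest : List (String × List String)) :
    pvMeasure T (f :: rest) = pvWeight T f + pvMeasure T rest := by
  simp [pvMeasure]

theorem pvWeight_pos (T : Nat) (f : String × List String) : 0 < pvWeight T f := by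
  unfold pvWeight
  exact pow_pos (by omega) _

theorem pvMeasure_push (T : Nat) (r : List String) :
    ∀ (adjR : List (String × String)) (rest : List (String × List String)),
    pvMeasure T (adjR.foldl (fun st nb => if nb.1 ∈ r then st else (nb.1, r ++ [nb.1]) :: st) rest)
      ≤ pvMeasure T rest + adjR.length * (T + 2) ^ (T + 2 - r.length) := by
  intro adjR
  induction adjR with
  | nil => intro rest; simp
  | cons hd tl ih =>
    intro rest
    simp only [List.foldl_cons, List.length_cons]
    have hmul : (tl.length + 1) * (T + 2) ^ (T + 2 - r.length)
        = tl.length * (T + 2) ^ (T + 2 - r.length) + (T + 2) ^ (T + 2 - r.length) := by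
      ring
    by_cases h : hd.1 ∈ r
    · rw [if_pos h]
      have := ih rest
      omega
    · rw [if_neg h]
      have hih := ih ((hd.1, r ++ [hd.1]) :: rest)
      have hw : pvMeasure T ((hd.1, r ++ [hd.1]) :: rest)
          = (T + 2) ^ (T + 2 - r.length) + pvMeasure T rest := by
        rw [pvMeasure_cons]
        unfold pvWeight
        have hx : T + 3 - (r ++ [hd.1]).length = T + 2 - r.length := by
          rw [List.length_append]
          simp only [List.length_cons, List.length_nil]
          omega
        rw [hx]
      rw [hw] at hih
      omega

theorem pvMeasure_push_lt (graph : List (String × List (String × String))) (c : String)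
    (r : List String) (rest : List (String × List String))
    (hg : r.length ≤ pvTotalAdj graph + 2) :
    pvMeasure (pvTotalAdj graph)
        ((pvAdj graph c).reverse.foldl
          (fun st nb => if nb.1 ∈ r then st else (nb.1, r ++ [nb.1]) :: st) rest)
      < pvMeasure (pvTotalAdj graph) ((c, r) :: rest) := by
  rw [pvMeasure_cons]
  have hpush := pvMeasure_push (pvTotalAdj graph) r ((pvAdj graph c).reverse) rest
  have hlen : ((pvAdj graph c).reverse).length ≤ pvTotalAdj graph := by
    rw [List.length_reverse]
    exact pvAdj_length_le graph c
  have hC : ((pvAdj graph c).reverse).length * (pvTotalAdj graph + 2) ^ (pvTotalAdj graph + 2 - r.length)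
      ≤ pvTotalAdj graph * (pvTotalAdj graph + 2) ^ (pvTotalAdj graph + 2 - r.length) :=
    Nat.mul_le_mul_right _ hlen
  have hT : pvTotalAdj graph * (pvTotalAdj graph + 2) ^ (pvTotalAdj graph + 2 - r.length)
      < (pvTotalAdj graph + 2) * (pvTotalAdj graph + 2) ^ (pvTotalAdj graph + 2 - r.length) :=
    mul_lt_mul_of_pos_right (by omega) (pow_pos (by omega) _)
  have hwr : pvWeight (pvTotalAdj graph) (c, r)
      = (pvTotalAdj graph + 2) * (pvTotalAdj graph + 2) ^ (pvTotalAdj graph + 2 - r.length) := by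
    unfold pvWeight
    have hx : pvTotalAdj graph + 3 - r.length = (pvTotalAdj graph + 2 - r.length) + 1 := by omega
    rw [hx, pow_succ]
    ring

  omega

def runW (graph : List (String × List (String × String))) (dest : String)
    (stack : List (String × List String)) (routes : List (List String)) : List (List String) :=
  match stack with
  | [] => routes
  | (c, r) :: rest =>
    if c = dest then runW graph dest rest (routes ++ [r])
    else if h : r.length ≤ pvTotalAdj graph + 2 then
      runW graph dest
        ((pvAdj graph c).reverse.foldl
          (fun st nb => if nb.1 ∈ r then st else (nb.1, r ++ [nb.1]) :: st) rest)
        routes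
    else runW graph dest rest routes
termination_by pvMeasure (pvTotalAdj graph) stack
decreasing_by
  · rw [pvMeasure_cons]
    have := pvWeight_pos (pvTotalAdj graph) (c, r)
    omega
  · simp only [dite_eq_ite]
    exact pvMeasure_push_lt graph c r rest h
  · rw [pvMeasure_cons]
    have := pvWeight_pos (pvTotalAdj graph) (c, r)
    omega

-- ----- the fueled ports coincide with the reference versions
theorem dfsA_eq_dfsW (graph : List (String × List (String × String))) (dest : String) :
    ∀ (fuel : Nat) (c : String) (route : List String) (acc : List (List String)),
      fuel + route.length = pvTotalAdj graph + 2 →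
      dfsA graph dest fuel c route acc = dfsW graph dest c route acc := by
  intro fuel
  induction fuel with
  | zero =>
    intro c route acc hfr
    rw [dfsA, dfsW]
    by_cases hc : c = dest
    · simp [hc]
    · have hg : ¬ route.length ≤ pvTotalAdj graph + 1 := by omega
      rw [if_neg hc, if_neg hc, dif_neg hg]
  | succ f ih =>
    intro c route acc hfr
    rw [dfsA, dfsW]
    by_cases hc : c = dest
    · simp [hc]
    · have hg : route.length ≤ pvTotalAdj graph + 1 := by omega
      rw [if_neg hc, if_neg hc, dif_pos hg]
      have hfr' : f + (route ++ [c]).length = pvTotalAdj graph + 2 := by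
        rw [List.length_append]
        simp only [List.length_cons, List.length_nil]
        omega
      generalize pvAdj graph c = adj
      induction adj generalizing acc with
      | nil => rw [dfsWList]; simp
      | cons hd tl ihadj =>
        rw [dfsWList]
        simp only [List.foldl_cons]
        by_cases hm : hd.1 ∈ route ++ [c]
        · rw [if_pos hm, if_pos hm]
          exact ihadj acc
        · rw [if_neg hm, if_neg hm, ih hd.1 (route ++ [c]) acc hfr']
          exact ihadj _

theorem runB_eq_runW (graph : List (String × List (String × String))) (dest : String) :
    ∀ (fuel : Nat) (stack : List (String × List String)) (routes : List (List String)),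
      pvMeasure (pvTotalAdj graph) stack ≤ fuel →
      runB graph dest fuel stack routes = runW graph dest stack routes := by
  intro fuel
  induction fuel with
  | zero =>
    intro stack routes hk
    match stack with
    | [] => rw [runB, runW]
    | (c, r) :: rest =>
      rw [pvMeasure_cons] at hk
      have := pvWeight_pos (pvTotalAdj graph) (c, r)
      omega
  | succ f ih =>
    intro stack routes hk
    match stack with
    | [] => rw [runB, runW]
    | (c, r) :: rest =>
      rw [pvMeasure_cons] at hk
      rw [runB, runW]
      by_cases hc : c = dest
      · rw [if_pos hc, if_pos hc]
        apply ih
        have := pvWeight_pos (pvTotalAdj graph) (c, r)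
        omega
      · by_cases hg : r.length ≤ pvTotalAdj graph + 2
        · rw [if_neg hc, if_neg hc, if_pos hg, dif_pos hg]
          apply ih
          have := pvMeasure_push_lt graph c r rest hg
          rw [pvMeasure_cons] at this
          omega
        · rw [if_neg hc, if_neg hc, if_neg hg, dif_neg hg]
          apply ih
          have := pvWeight_pos (pvTotalAdj graph) (c, r)
          omega

-- ----- pushing reversed(graph[city]) onto the stack = the kept neighbour frames, in order
theorem push_eq (r : List String) (adj : List (String × String)) (rest : List (String × List String)) :
    adj.reverse.foldl (fun st nb => if nb.1 ∈ r then st else (nb.1, r ++ [nb.1]) :: st) rest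
      = adj.filterMap (fun nb => if nb.1 ∈ r then none else some (nb.1, r ++ [nb.1])) ++ rest := by
  rw [List.foldl_reverse]
  induction adj with
  | nil => simp
  | cons hd tl ih =>
    simp only [List.foldr_cons, List.filterMap_cons]
    by_cases h : hd.1 ∈ r
    · simp [h, ih]
    · simp [h, ih]

-- ----- the step lemma: popping one frame and finishing the loop = finishing the
-- ----- loop after the whole recursive DFS from that frame (k bounds the depth left)
theorem stepRunW (graph : List (String × List (String × String))) (dest : String) :
    ∀ (k : Nat) (c : String) (route : List String) (acc : List (List String))
      (rest : List (String × List String)),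
      pvTotalAdj graph + 2 - route.length ≤ k →
      runW graph dest ((c, route ++ [c]) :: rest) acc
        = runW graph dest rest (dfsW graph dest c route acc) := by
  intro k
  induction k with
  | zero =>
    intro c route acc rest hk
    rw [runW, dfsW]
    by_cases hc : c = dest
    · simp [hc]
    · have hg : ¬ route.length ≤ pvTotalAdj graph + 1 := by omega
      have hg1 : ¬ (route ++ [c]).length ≤ pvTotalAdj graph + 2 := by
        simp only [List.length_append, List.length_cons, List.length_nil]
        omega
      rw [if_neg hc, if_neg hc, dif_neg hg1, dif_neg hg]
  | succ k ih =>
    intro c route acc rest hk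
    rw [runW, dfsW]
    by_cases hc : c = dest
    · simp [hc]
    · by_cases hg : route.length ≤ pvTotalAdj graph + 1
      · have hg1 : (route ++ [c]).length ≤ pvTotalAdj graph + 2 := by
          simp only [List.length_append, List.length_cons, List.length_nil]
          omega
        rw [if_neg hc, if_neg hc, dif_pos hg1, dif_pos hg, push_eq]
        have hmeas : pvTotalAdj graph + 2 - (route ++ [c]).length ≤ k := by
          simp only [List.length_append, List.length_cons, List.length_nil]
          omega
        generalize pvAdj graph c = adj
        induction adj generalizing acc rest with
        | nil => rw [dfsWList]; simp
        | cons hd tl ihadj =>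
          rw [dfsWList]
          by_cases hm : hd.1 ∈ route ++ [c]
          · simp only [List.filterMap_cons, if_pos hm]
            exact ihadj acc rest
          · simp only [List.filterMap_cons, if_neg hm, List.cons_append]
            rw [ih hd.1 (route ++ [c]) acc _ hmeas]
            exact ihadj _ rest
      · have hg1 : ¬ (route ++ [c]).length ≤ pvTotalAdj graph + 2 := by
          simp only [List.length_append, List.length_cons, List.length_nil]
          omega
        rw [if_neg hc, if_neg hc, dif_neg hg1, dif_neg hg]

theorem runW_nil (graph : List (String × List (String × String))) (dest : String)
    (routes : List (List String)) : runW graph dest [] routes = routes := by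
  rw [runW]

-- ----- the whole loop from the seed frame = the recursive DFS from the origin
theorem routes_eq (graph : List (String × List (String × String))) (dest origin : String) :
    runW graph dest [(origin, [origin])] [] = dfsW graph dest origin [] [] := by
  have h := stepRunW graph dest (pvTotalAdj graph + 2) origin [] [] [] (by simp)
  rw [runW_nil] at h
  simpa using h

-- ----- every route produced by the DFS extends the current route by at least one city
theorem dfsW_len (graph : List (String × List (String × String))) (dest : String) :
    ∀ (k : Nat) (c : String) (route : List String) (acc : List (List String)) (x : List String),
      pvTotalAdj graph + 2 - route.length ≤ k → x ∈ dfsW graph dest c route acc →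
      x ∈ acc ∨ route.length + 1 ≤ x.length := by
  intro k
  induction k with
  | zero =>
    intro c route acc x hk hx
    rw [dfsW] at hx
    by_cases hc : c = dest
    · rw [if_pos hc] at hx
      rcases List.mem_append.1 hx with h | h
      · exact Or.inl h
      · right; simp only [List.mem_singleton] at h; subst h; simp
    · have hg : ¬ route.length ≤ pvTotalAdj graph + 1 := by omega
      rw [if_neg hc, dif_neg hg] at hx
      exact Or.inl hx
  | succ k ih =>
    intro c route acc x hk hx
    rw [dfsW] at hx
    by_cases hc : c = dest
    · rw [if_pos hc] at hx
      rcases List.mem_append.1 hx with h | h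
      · exact Or.inl h
      · right; simp only [List.mem_singleton] at h; subst h; simp
    · by_cases hg : route.length ≤ pvTotalAdj graph + 1
      · rw [if_neg hc, dif_pos hg] at hx
        have hmeas : pvTotalAdj graph + 2 - (route ++ [c]).length ≤ k := by
          simp only [List.length_append, List.length_cons, List.length_nil]
          omega
        have inner : ∀ (adj : List (String × String)) (acc : List (List String)),
            x ∈ dfsWList graph dest adj (route ++ [c]) acc →
            x ∈ acc ∨ (route ++ [c]).length + 1 ≤ x.length := by
          intro adj
          induction adj with
          | nil => intro acc h; rw [dfsWList] at h; exact Or.inl h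
          | cons hd tl ihadj =>
            intro acc h
            rw [dfsWList] at h
            rcases ihadj _ h with h2 | h2
            · by_cases hm : hd.1 ∈ route ++ [c]
              · rw [if_pos hm] at h2; exact Or.inl h2
              · rw [if_neg hm] at h2
                exact ih hd.1 (route ++ [c]) acc x hmeas h2
            · exact Or.inr h2
        rcases inner _ _ hx with h | h
        · exact Or.inl h
        · right
          simp only [List.length_append, List.length_cons, List.length_nil] at h
          omega
      · rw [if_neg hc, dif_neg hg] at hx
        exact Or.inl hx

theorem dfsWList_len (graph : List (String × List (String × String))) (dest : String) :
    ∀ (adj : List (String × String)) (route' : List String) (acc : List (List String))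
      (x : List String),
      x ∈ dfsWList graph dest adj route' acc → x ∈ acc ∨ route'.length + 1 ≤ x.length := by
  intro adj
  induction adj with
  | nil => intro route' acc x h; rw [dfsWList] at h; exact Or.inl h
  | cons hd tl ihadj =>
    intro route' acc x h
    rw [dfsWList] at h
    rcases ihadj _ _ _ h with h2 | h2
    · by_cases hm : hd.1 ∈ route'
      · rw [if_pos hm] at h2; exact Or.inl h2
      · rw [if_neg hm] at h2
        exact dfsW_len graph dest (pvTotalAdj graph + 2 - route'.length) hd.1 route' acc x
          (le_refl _) h2
    · exact Or.inr h2

-- ----- A's post-loop: when every route has at least two cities, it is a sorted map of len - 2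
theorem procA_eq :
    ∀ (lst : List (List String)) (acc : List Int),
      (∀ r ∈ lst, 2 ≤ r.length) →
      procA lst acc
        = some (PySem.List.sorted (acc ++ lst.map (fun r => (r.length : Int) - 2))
            (fun x => x) false) := by
  intro lst
  induction lst with
  | nil => intro acc _; simp [procA]
  | cons r tl ih =>
    intro acc h
    have h2 : 2 ≤ r.length := h r (by simp)
    have htl : ∀ s ∈ tl, 2 ≤ s.length := fun s hs => h s (List.mem_cons_of_mem _ hs)
    simp only [procA]
    by_cases hl : r.length = 2
    · rw [if_pos hl, ih _ htl]
      have harr : (acc ++ [(0 : Int)]) ++ tl.map (fun r => (r.length : Int) - 2)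
          = acc ++ (r :: tl).map (fun r => (r.length : Int) - 2) := by
        simp [hl]
      rw [harr]
    · have hl1 : ¬ r.length = 1 := by omega
      rw [if_neg hl, if_neg hl1, ih _ htl]
      have harr : (acc ++ [(r.length : Int) - 2]) ++ tl.map (fun r => (r.length : Int) - 2)
          = acc ++ (r :: tl).map (fun r => (r.length : Int) - 2) := by
        simp
      rw [harr]

-- ===== VERDICT (by name: the statement is the Claim_ definition above) =====
theorem find_number_of_layovers_spec : Claim_equal_find_number_of_layovers := by
  intro graph origin destination _ _
  unfold Spec_find_number_of_layovers
  unfold find_number_of_layovers find_number_of_layovers_alt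
  by_cases h1 : destination ∈ pvKeys graph
  · by_cases h2 : origin ∈ pvKeys graph
    · rw [if_neg (by simp [h1, h2]), if_neg (by simp [h1, h2])]
      rw [dfsA_eq_dfsW graph destination (pvTotalAdj graph + 2) origin [] [] (by simp)]
      rw [runB_eq_runW graph destination _ _ _ (by simp [pvMeasure, pvWeight])]
      rw [routes_eq]
      by_cases hod : origin = destination
      · subst hod
        have hdfs : dfsW graph origin origin [] [] = [[origin]] := by
          rw [dfsW]; simp
        rw [hdfs, if_pos rfl]
        simp [procA]
      · rw [if_neg hod]
        have hunf : dfsW graph destination origin [] []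
            = dfsWList graph destination (pvAdj graph origin) [origin] [] := by
          rw [dfsW]
          rw [if_neg hod, dif_pos (by simp)]
          simp
        have hlen : ∀ x ∈ dfsW graph destination origin [] [], 2 ≤ x.length := by
          intro x hx
          rw [hunf] at hx
          rcases dfsWList_len graph destination _ _ _ _ hx with h | h
          · simp at h
          · simpa using h
        rw [procA_eq _ _ hlen]
        simp
    · rw [if_pos (by simp [h2]), if_pos (by simp [h2])]
  · rw [if_pos (by simp [h1]), if_pos (by simp [h1])]
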